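-- pv_equiv track=rewrite | github.com/KBavis/scrape-and-score | scrape_and_score/service/team_game_logs_service.py | get_weekly_aggergate_metrics
-- ===== SOURCE A (Python) =====
-- def get_weekly_aggergate_metrics(season_game_logs: list):
--     """
--     Helper function to calculate the weekly aggergate metrics of a teams season game log metrics
--
--     Args:
--         season_game_logs (list): list of season long game logs
--
--     Returns:
--         list: weekly aggregate metrics
--     """
--     # metrics to account for
--     points_for = 0
--     points_against = 0
--     pass_yards_for = 0
--     pass_yards_against = 0
--     rush_yards_for = 0
--     rush_yards_against = 0
--
--     weekly_aggregate_metrics = []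
--
--     for weekly_game_log in season_game_logs:
--
--         points_for += weekly_game_log.get("points_for", 0)
--         points_against += weekly_game_log.get("points_allowed", 0)
--         pass_yards_for += weekly_game_log.get("pass_yds", 0)
--         pass_yards_against += weekly_game_log.get("opp_pass_yds", 0)
--         rush_yards_for += weekly_game_log.get("rush_yds", 0)
--         rush_yards_against += weekly_game_log.get("opp_rush_yds", 0)
--
--
--         metrics = {
--             "team_id": weekly_game_log.get("team_id"),
--             "week": weekly_game_log.get("week"),
--             "points_for": points_for,
--             "points_against": points_against,
--             "pass_yards_for": pass_yards_for,
--             "pass_yards_against": pass_yards_against,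
--             "rush_yards_for": rush_yards_for,
--             "rush_yards_against": rush_yards_against,
--         }
--         weekly_aggregate_metrics.append(metrics)
--
--     return weekly_aggregate_metrics
-- ===== SOURCE B (Python) =====
-- def _get(d, k, default=None):
--     return d.get(k, default)
--
--
-- def _accumulate(values):
--     """Running totals of an iterable of ints."""
--     totals = []
--     running = 0
--     for v in values:
--         running += v
--         totals.append(running)
--     return totals
--
--
-- def get_weekly_aggergate_metrics(season_game_logs: list):
--     metric_keys = ["points_for", "points_allowed", "pass_yds",
--                    "opp_pass_yds", "rush_yds", "opp_rush_yds"]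
--     cums = [_accumulate(gl.get(k, 0) for gl in season_game_logs)
--             for k in metric_keys]
--     ids = [gl.get("team_id") for gl in season_game_logs]
--     weeks = [gl.get("week") for gl in season_game_logs]
--     return [
--         {
--             "team_id": t,
--             "week": w,
--             "points_for": pf,
--             "points_against": pa,
--             "pass_yards_for": pyf,
--             "pass_yards_against": pya,
--             "rush_yards_for": ryf,
--             "rush_yards_against": rya,
--         }
--         for t, w, pf, pa, pyf, pya, ryf, rya in zip(ids, weeks, *cums)
--     ]
-- ===== Notes on version B (the rewrite author's own statement) =====
-- stated objective: alternative
-- what changed: Replaces the single loop carrying six running accumulators by a column-wise decomposition: each metric's cumulative sequence is computed independently with an accumulate helper, and the output rows are assembled by zipping the eight aligned sequences.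
import Mathlib
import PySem

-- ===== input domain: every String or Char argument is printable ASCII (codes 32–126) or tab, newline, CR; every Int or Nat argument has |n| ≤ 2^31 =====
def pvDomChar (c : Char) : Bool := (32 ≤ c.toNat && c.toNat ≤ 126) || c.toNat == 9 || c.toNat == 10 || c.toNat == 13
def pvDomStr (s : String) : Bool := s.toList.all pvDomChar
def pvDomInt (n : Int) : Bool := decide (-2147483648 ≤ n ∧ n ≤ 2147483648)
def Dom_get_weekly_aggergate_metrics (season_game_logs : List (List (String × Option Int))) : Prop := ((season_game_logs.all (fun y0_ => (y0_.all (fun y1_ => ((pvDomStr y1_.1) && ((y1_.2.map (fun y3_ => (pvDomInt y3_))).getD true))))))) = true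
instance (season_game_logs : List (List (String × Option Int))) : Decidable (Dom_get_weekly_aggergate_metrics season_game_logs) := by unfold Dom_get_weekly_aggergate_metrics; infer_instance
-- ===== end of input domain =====

-- B replaces A's single loop over six running accumulators by a column-wise decomposition
-- (one cumulative sequence per metric, zipped into rows); objective: alternative, same cost.

-- shared primitive: Python dict.get on the association list (first match)
def dictGet? (d : List (String × Option Int)) (k : String) : Option (Option Int) :=
  match d with
  | [] => none
  | (k', v) :: rest => if k' = k then some v else dictGet? rest k

-- gl.get(k, 0) used as an int; the 'some none' case is a Python TypeError, excluded by Pre_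
def dictGetInt (d : List (String × Option Int)) (k : String) : Int :=
  match dictGet? d k with
  | some (some v) => v
  | _ => 0

-- gl.get(k)  (default None)
def dictGetOpt (d : List (String × Option Int)) (k : String) : Option Int :=
  match dictGet? d k with
  | some v => v
  | none => none

-- ===== PORT A =====
-- the dict literal A appends each iteration
def aRow (gl : List (String × Option Int)) (pf pa pyf pya rf ra : Int) : List (String × Option Int) :=
  [("team_id", dictGetOpt gl "team_id"), ("week", dictGetOpt gl "week"),
   ("points_for", some pf), ("points_against", some pa),
   ("pass_yards_for", some pyf), ("pass_yards_against", some pya),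
   ("rush_yards_for", some rf), ("rush_yards_against", some ra)]

-- A's loop with its six running accumulators
def aLoop (sgl : List (List (String × Option Int))) (pf pa pyf pya rf ra : Int) :
    List (List (String × Option Int)) :=
  match sgl with
  | [] => []
  | gl :: rest =>
    let pf' := pf + dictGetInt gl "points_for"
    let pa' := pa + dictGetInt gl "points_allowed"
    let pyf' := pyf + dictGetInt gl "pass_yds"
    let pya' := pya + dictGetInt gl "opp_pass_yds"
    let rf' := rf + dictGetInt gl "rush_yds"
    let ra' := ra + dictGetInt gl "opp_rush_yds"
    aRow gl pf' pa' pyf' pya' rf' ra' :: aLoop rest pf' pa' pyf' pya' rf' ra'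

def get_weekly_aggergate_metrics (season_game_logs : List (List (String × Option Int))) : List (List (String × Option Int)) :=
  aLoop season_game_logs 0 0 0 0 0 0

-- ===== PORT B =====
-- Source B's _accumulate helper (running totals)
def bAccum (running : Int) (vals : List Int) : List Int :=
  match vals with
  | [] => []
  | v :: vs => (running + v) :: bAccum (running + v) vs

-- Source B's 8-way zip building each output dict from the aligned sequences
def bZip8 (ts ws : List (Option Int)) (pfs pas pyfs pyas rfs ras : List Int) :
    List (List (String × Option Int)) :=
  match ts, ws, pfs, pas, pyfs, pyas, rfs, ras with
  | t :: ts, w :: ws, pf :: pfs, pa :: pas, pyf :: pyfs, pya :: pyas, rf :: rfs, ra :: ras =>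
    [("team_id", t), ("week", w),
     ("points_for", some pf), ("points_against", some pa),
     ("pass_yards_for", some pyf), ("pass_yards_against", some pya),
     ("rush_yards_for", some rf), ("rush_yards_against", some ra)]
    :: bZip8 ts ws pfs pas pyfs pyas rfs ras
  | _, _, _, _, _, _, _, _ => []

def get_weekly_aggergate_metrics_alt (season_game_logs : List (List (String × Option Int))) : List (List (String × Option Int)) :=
  bZip8 (season_game_logs.map (fun gl => dictGetOpt gl "team_id"))
        (season_game_logs.map (fun gl => dictGetOpt gl "week"))
        (bAccum 0 (season_game_logs.map (fun gl => dictGetInt gl "points_for")))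
        (bAccum 0 (season_game_logs.map (fun gl => dictGetInt gl "points_allowed")))
        (bAccum 0 (season_game_logs.map (fun gl => dictGetInt gl "pass_yds")))
        (bAccum 0 (season_game_logs.map (fun gl => dictGetInt gl "opp_pass_yds")))
        (bAccum 0 (season_game_logs.map (fun gl => dictGetInt gl "rush_yds")))
        (bAccum 0 (season_game_logs.map (fun gl => dictGetInt gl "opp_rush_yds")))

-- ===== PRECONDITION & SPEC =====
-- Pre_ excludes inputs where some game log stores None under one of the six summed metric
-- keys: there Python A (and B) raise TypeError adding None to an int.
def Pre_get_weekly_aggergate_metrics (season_game_logs : List (List (String × Option Int))) : Prop :=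
  ∀ gl ∈ season_game_logs,
    ∀ k ∈ ["points_for", "points_allowed", "pass_yds", "opp_pass_yds", "rush_yds", "opp_rush_yds"],
      gl.lookup k ≠ some none
instance (season_game_logs : List (List (String × Option Int))) : Decidable (Pre_get_weekly_aggergate_metrics season_game_logs) := by unfold Pre_get_weekly_aggergate_metrics; infer_instance

def pvWitness_get_weekly_aggergate_metrics : (List (List (String × Option Int))) :=
  [[("team_id", some 1), ("week", some 1), ("points_for", some 21), ("points_allowed", some 7)],
   [("team_id", some 1), ("week", none), ("points_for", some 3), ("rush_yds", some 100)]]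

def Spec_get_weekly_aggergate_metrics (season_game_logs : List (List (String × Option Int))) (out : List (List (String × Option Int))) : Prop := out = get_weekly_aggergate_metrics_alt season_game_logs
instance (season_game_logs : List (List (String × Option Int))) (out : List (List (String × Option Int))) : Decidable (Spec_get_weekly_aggergate_metrics season_game_logs out) := by unfold Spec_get_weekly_aggergate_metrics; infer_instance

-- ===== CLAIM (what is proved, stated in full; the proofs are below) =====
def Claim_equal_get_weekly_aggergate_metrics : Prop := ∀ (season_game_logs : List (List (String × Option Int))), Dom_get_weekly_aggergate_metrics season_game_logs → Pre_get_weekly_aggergate_metrics season_game_logs → Spec_get_weekly_aggergate_metrics season_game_logs (get_weekly_aggergate_metrics season_game_logs)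

-- ===== LEMMAS AND PROOFS =====
-- Loop/column invariant: A's loop from any accumulator state equals B's zip of the
-- cumulative columns started at that state.
theorem aLoop_eq_bZip8 (sgl : List (List (String × Option Int))) (pf pa pyf pya rf ra : Int) :
    aLoop sgl pf pa pyf pya rf ra =
    bZip8 (sgl.map (fun gl => dictGetOpt gl "team_id"))
          (sgl.map (fun gl => dictGetOpt gl "week"))
          (bAccum pf (sgl.map (fun gl => dictGetInt gl "points_for")))
          (bAccum pa (sgl.map (fun gl => dictGetInt gl "points_allowed")))
          (bAccum pyf (sgl.map (fun gl => dictGetInt gl "pass_yds")))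
          (bAccum pya (sgl.map (fun gl => dictGetInt gl "opp_pass_yds")))
          (bAccum rf (sgl.map (fun gl => dictGetInt gl "rush_yds")))
          (bAccum ra (sgl.map (fun gl => dictGetInt gl "opp_rush_yds"))) := by
  induction sgl generalizing pf pa pyf pya rf ra with
  | nil => simp [aLoop, bAccum, bZip8]
  | cons gl rest ih => simp [aLoop, bAccum, bZip8, aRow, List.map_cons, ih]

-- ===== VERDICT (by name: the statement is the Claim_ definition above) =====
theorem get_weekly_aggergate_metrics_spec : Claim_equal_get_weekly_aggergate_metrics := by
  intro sgl _ _
  unfold Spec_get_weekly_aggergate_metrics get_weekly_aggergate_metrics get_weekly_aggergate_metrics_alt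
  exact aLoop_eq_bZip8 sgl 0 0 0 0 0 0
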